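-- pv_equiv track=rewrite | github.com/cms-sw/cmssw | PerfTools/AllocMonitor/scripts/edmIntrusiveAllocProfilerFoldStacks.py | parse_quantity_value_line
-- ===== SOURCE A (Python) =====
-- def parse_quantity_value_line(line):
--     """Parse a line containing quantity-value pairs.
--     Returns an ordered list of (quantity, value) tuples."""
--     tokens = line.split()
--     pairs = []
--     i = 0
--     while i + 1 < len(tokens):
--         try:
--             value = int(tokens[i + 1])
--             pairs.append((tokens[i], value))
--             i += 2
--         except ValueError:
--             i += 1
--     return pairs
-- ===== SOURCE B (Python) =====
-- def parse_quantity_value_line(line):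
--     """Parse a line containing quantity-value pairs.
--     Returns an ordered list of (quantity, value) tuples."""
--     pairs = []
--     pending = None
--     for token in line.split():
--         if pending is None:
--             pending = token
--         else:
--             try:
--                 pairs.append((pending, int(token)))
--                 pending = None
--             except ValueError:
--                 pending = token
--     return pairs
-- ===== Notes on version B (the rewrite author's own statement) =====
-- stated objective: simpler
-- what changed: Replaced the variable-step index loop (i += 2 or i += 1 with an i+1<len guard) by a single uniform left-to-right pass holding a single pending-quantity register; a leftover pending token is simply discarded.
import Mathlib
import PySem

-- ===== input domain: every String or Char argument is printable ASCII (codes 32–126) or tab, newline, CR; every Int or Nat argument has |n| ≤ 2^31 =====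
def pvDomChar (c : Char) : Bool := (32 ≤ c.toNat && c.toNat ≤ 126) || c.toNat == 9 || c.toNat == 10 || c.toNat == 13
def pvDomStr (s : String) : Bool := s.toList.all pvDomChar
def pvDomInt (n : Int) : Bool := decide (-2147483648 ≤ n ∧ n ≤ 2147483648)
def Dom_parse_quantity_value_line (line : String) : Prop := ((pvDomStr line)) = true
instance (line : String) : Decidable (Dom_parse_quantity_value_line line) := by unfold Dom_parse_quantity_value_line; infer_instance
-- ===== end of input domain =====

-- B replaces A's variable-step index loop by a uniform one-pass state machine with a pending-quantity register (simpler decomposition, same cost).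

-- ===== PORT A =====
-- while i + 1 < len(tokens): try int(tokens[i+1]) → append (tokens[i], v), i += 2; except ValueError → i += 1
def pvLoopA (tokens : List String) (pairs : List (String × Int)) (i : Nat) : List (String × Int) :=
  if _h : i + 1 < tokens.length then
    match PySem.Int.ofStr? (tokens.getD (i + 1) "") with
    | some v => pvLoopA tokens (pairs ++ [(tokens.getD i "", v)]) (i + 2)
    | none   => pvLoopA tokens pairs (i + 1)
  else pairs
termination_by tokens.length - i

def parse_quantity_value_line (line : String) : List (String × Int) :=
  pvLoopA (PySem.Str.split₀ line) [] 0

-- ===== PORT B =====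
-- single pass: pending=None; store token as pending, or try int(token) to close a pair (failed value becomes the new pending)
def pvStepB (st : List (String × Int) × Option String) (t : String) : List (String × Int) × Option String :=
  match st.2 with
  | none => (st.1, some t)
  | some q =>
    match PySem.Int.ofStr? t with
    | some v => (st.1 ++ [(q, v)], none)
    | none   => (st.1, some t)

def parse_quantity_value_line_alt (line : String) : List (String × Int) :=
  ((PySem.Str.split₀ line).foldl pvStepB ([], none)).1

-- ===== PRECONDITION & SPEC =====
def Spec_parse_quantity_value_line (line : String) (out : List (String × Int)) : Prop := out = parse_quantity_value_line_alt line
instance (line : String) (out : List (String × Int)) : Decidable (Spec_parse_quantity_value_line line out) := by unfold Spec_parse_quantity_value_line; infer_instance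

-- ===== CLAIM (what is proved, stated in full; the proofs are below) =====
def Claim_equal_parse_quantity_value_line : Prop := ∀ (line : String), Dom_parse_quantity_value_line line → Spec_parse_quantity_value_line line (parse_quantity_value_line line)

-- ===== LEMMAS AND PROOFS =====

-- accumulator of the fold comes out front
theorem pvFold_acc (ts : List String) (ps : List (String × Int)) (pend : Option String) :
    (ts.foldl pvStepB (ps, pend)).1 = ps ++ (ts.foldl pvStepB ([], pend)).1 := by
  induction ts generalizing ps pend with
  | nil => simp
  | cons t ts ih =>
    cases pend with
    | none =>
      simp only [List.foldl_cons, pvStepB]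
      exact ih ps (some t)
    | some q =>
      cases h : PySem.Int.ofStr? t with
      | none =>
        simp only [List.foldl_cons, pvStepB, h]
        exact ih ps (some t)
      | some v =>
        simp only [List.foldl_cons, pvStepB, h, List.nil_append]
        rw [ih (ps ++ [(q, v)]) none, ih [(q, v)] none]
        simp

theorem pvLoopA_eq_fold (tokens : List String) (pairs : List (String × Int)) (i : Nat) :
    pvLoopA tokens pairs i = pairs ++ ((tokens.drop i).foldl pvStepB ([], none)).1 := by
  by_cases h : i + 1 < tokens.length
  · have hi : i < tokens.length := by omega
    have hi1 : i + 1 < tokens.length := h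
    have hd : tokens.drop i = tokens[i] :: tokens[i+1] :: tokens.drop (i + 2) := by
      rw [List.drop_eq_getElem_cons hi, List.drop_eq_getElem_cons hi1]
    have hgi : tokens.getD i "" = tokens[i] := List.getD_eq_getElem _ _ hi
    have hgi1 : tokens.getD (i + 1) "" = tokens[i+1] := List.getD_eq_getElem _ _ hi1
    rw [pvLoopA]
    simp only [h, dif_pos, hgi, hgi1]
    cases hv : PySem.Int.ofStr? tokens[i+1] with
    | some v =>
      show pvLoopA tokens (pairs ++ [(tokens[i], v)]) (i + 2) = _
      rw [pvLoopA_eq_fold tokens _ (i + 2), hd]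
      simp only [List.foldl_cons, pvStepB, hv, List.nil_append]
      rw [pvFold_acc (tokens.drop (i + 2)) [(tokens[i], v)] none]
      simp
    | none =>
      show pvLoopA tokens pairs (i + 1) = _
      rw [pvLoopA_eq_fold tokens pairs (i + 1), hd,
          List.drop_eq_getElem_cons hi1]
      simp only [List.foldl_cons, pvStepB, hv]
  · rw [pvLoopA]
    simp only [h, dif_neg, not_false_iff]
    rcases hd : tokens.drop i with _ | ⟨t, rest⟩
    · simp
    · have : rest = [] := by
        have := List.length_drop (l := tokens) (i := i)
        rw [hd] at this
        simp at this
        cases rest with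
        | nil => rfl
        | cons a as => simp at this; omega
      subst this
      simp [pvStepB]
termination_by tokens.length - i

-- ===== VERDICT (by name: the statement is the Claim_ definition above) =====
theorem parse_quantity_value_line_spec : Claim_equal_parse_quantity_value_line := by
  intro line _
  unfold Spec_parse_quantity_value_line parse_quantity_value_line parse_quantity_value_line_alt
  rw [pvLoopA_eq_fold]
  simp
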